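-- pv_equiv track=rewrite | github.com/xile42/leetcode | python3/2231. 按奇偶性交换后的最大数字.py | largestInteger
-- ===== SOURCE A (Python) =====
-- def largestInteger(num: int) -> int:
--
--     ns = list(map(int, str(num)))
--     odds = sorted([i for i in ns if i & 1], reverse=True)
--     even = sorted([i for i in ns if not i & 1], reverse=True)
--     ans = str()
--     for c in str(num):
--         if int(c) & 1:
--             ans += str(odds.pop(0))
--         else:
--             ans += str(even.pop(0))
--
--     return int(ans)
-- ===== SOURCE B (Python) =====
-- def largestInteger(num: int) -> int:
--     # Counting approach: a frequency table of the ten digit values replaces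
--     # the two sorted lists; each position takes the largest remaining digit
--     # of its parity by a bounded scan 9..0.
--     s = str(num)
--     cnt = [0] * 10
--     for c in s:
--         cnt[int(c)] += 1
--     out = []
--     for c in s:
--         p = int(c) & 1
--         for d in range(9, -1, -1):
--             if (d & 1) == p and cnt[d] > 0:
--                 cnt[d] -= 1
--                 out.append(str(d))
--                 break
--     return int("".join(out))
-- ===== Notes on version B (the rewrite author's own statement) =====
-- stated objective: alternative
-- what changed: Replaces the two sorted-descending lists with pop(0) by a length-10 digit frequency table: each position selects the largest remaining same-parity digit by a bounded 9..0 scan and decrements its count, and the result is accumulated as digit strings joined once; no sort is performed.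
import Mathlib
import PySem

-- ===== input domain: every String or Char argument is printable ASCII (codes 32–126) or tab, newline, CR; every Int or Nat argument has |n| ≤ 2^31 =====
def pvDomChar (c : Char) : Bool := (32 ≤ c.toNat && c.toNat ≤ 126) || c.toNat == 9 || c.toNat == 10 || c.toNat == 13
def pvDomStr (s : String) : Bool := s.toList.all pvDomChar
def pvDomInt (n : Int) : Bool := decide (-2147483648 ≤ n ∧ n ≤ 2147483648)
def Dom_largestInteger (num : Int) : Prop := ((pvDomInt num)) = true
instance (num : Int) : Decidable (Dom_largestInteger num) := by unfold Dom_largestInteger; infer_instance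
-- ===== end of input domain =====

-- B replaces A's two sorted lists (+ pop(0)) by a 10-entry digit frequency table with a
-- bounded 9..0 scan per position (alternative decomposition, no sort).

-- ===== PORT A =====
-- int(c) for a one-character string: int(c) = ofStr? "c" = ofChars? [c] (PySem.Int.ofStr?_ofList);
-- the getD default is only taken where Python's int(c) raises ValueError (never under Pre_).
def pyIntChar (c : Char) : Int := (PySem.Int.ofChars? [c]).getD 0

-- one iteration of A's 'for c in str(num)' loop; state = (odds, even, ans)
def aStep (st : List Int × List Int × String) (c : Char) : List Int × List Int × String :=
  if !(PySem.Int.band (pyIntChar c) 1 == 0) then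
    match PySem.List.pop? st.1 0 with
    | some (v, rest) => (rest, st.2.1, st.2.2 ++ PySem.Int.toStr v)
    | none => st      -- Python raises IndexError here; unreachable for num ≥ 0
  else
    match PySem.List.pop? st.2.1 0 with
    | some (v, rest) => (st.1, rest, st.2.2 ++ PySem.Int.toStr v)
    | none => st      -- unreachable for num ≥ 0

def largestInteger (num : Int) : Int :=
  let ns : List Int := (PySem.Int.toStr num).toList.map pyIntChar
  let odds := PySem.List.sorted (ns.filter (fun i => !(PySem.Int.band i 1 == 0))) (fun x => x) true
  let even := PySem.List.sorted (ns.filter (fun i => PySem.Int.band i 1 == 0)) (fun x => x) true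
  let fin := (PySem.Int.toStr num).toList.foldl aStep (odds, even, "")
  (PySem.Int.ofStr? fin.2.2).getD 0   -- int(ans); getD taken only where Python raises (num < 0)

-- ===== PORT B =====
-- B's inner 'for d in range(9,-1,-1): … break' — first d with (d & 1) == p and cnt[d] > 0
def pickB (p : Int) (cnt : List Int) : List Int → Option Int
  | [] => none
  | d :: rest =>
      if (PySem.Int.band d 1 == p) && decide (0 < PySem.List.pyGetD cnt d 0) then some d
      else pickB p cnt rest

-- cnt[int(c)] += 1 (list write by hand: exact for 0 ≤ int(c) ≤ 9, which holds for num ≥ 0)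
def bCount (cnt : List Int) (c : Char) : List Int :=
  cnt.set (pyIntChar c).toNat (PySem.List.pyGetD cnt (pyIntChar c) 0 + 1)

-- one iteration of B's second loop; state = (cnt, out)
def bStep (st : List Int × List String) (c : Char) : List Int × List String :=
  let p := PySem.Int.band (pyIntChar c) 1
  match pickB p st.1 (PySem.List.pyRange 9 (-1) (-1)) with
  | some d => (st.1.set d.toNat (PySem.List.pyGetD st.1 d 0 - 1), st.2 ++ [PySem.Int.toStr d])
  | none => st      -- loop ends with no break: nothing appended (unreachable for num ≥ 0)

def largestInteger_alt (num : Int) : Int :=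
  let s := (PySem.Int.toStr num).toList
  let cnt := s.foldl bCount (List.replicate 10 (0 : Int))
  let fin := s.foldl bStep (cnt, ([] : List String))
  (PySem.Int.ofStr? (PySem.Str.join "" fin.2)).getD 0

-- ===== PRECONDITION & SPEC =====
-- Python A raises ValueError on num < 0 (int('-') inside list(map(int, str(num)))); B raises there too.
def Pre_largestInteger (num : Int) : Prop := 0 ≤ num
instance (num : Int) : Decidable (Pre_largestInteger num) := by unfold Pre_largestInteger; infer_instance
def pvWitness_largestInteger : Int := (65875)

def Spec_largestInteger (num : Int) (out : Int) : Prop := out = largestInteger_alt num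
instance (num : Int) (out : Int) : Decidable (Spec_largestInteger num out) := by unfold Spec_largestInteger; infer_instance

-- ===== CLAIM (what is proved, stated in full; the proofs are below) =====
def Claim_equal_largestInteger : Prop := ∀ (num : Int), Dom_largestInteger num → Pre_largestInteger num → Spec_largestInteger num (largestInteger num)

-- ===== LEMMAS AND PROOFS =====

-- 'i & 1' as a Bool test (A's truthiness test for odd)
def oddp (i : Int) : Bool := !(PySem.Int.band i 1 == 0)

lemma band1_cases (d : Int) : PySem.Int.band d 1 = 0 ∨ PySem.Int.band d 1 = 1 := by
  rw [PySem.Int.band_one]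
  have h1 := PySem.Int.mod_nonneg d (b := 2) (by norm_num)
  have h2 := PySem.Int.mod_lt d (b := 2) (by norm_num)
  omega

lemma oddp_true_iff (d : Int) : oddp d = true ↔ PySem.Int.band d 1 = 1 := by
  rcases band1_cases d with h | h <;> simp [oddp, h]

-- every character str(n) produces, n ≥ 0, is a decimal digit character
lemma toDigitsCore_digits (f : Nat) : ∀ (n : Nat) (acc : List Char),
    (∀ c ∈ acc, ∃ d : Nat, d < 10 ∧ c = Nat.digitChar d) →
    ∀ c ∈ Nat.toDigitsCore 10 f n acc, ∃ d : Nat, d < 10 ∧ c = Nat.digitChar d := by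
  induction f with
  | zero => intro n acc hacc; simpa [Nat.toDigitsCore] using hacc
  | succ f ih =>
    intro n acc hacc c hc
    simp only [Nat.toDigitsCore] at hc
    split at hc
    · rcases List.mem_cons.mp hc with h1 | h1
      · exact ⟨n % 10, Nat.mod_lt _ (by norm_num), h1⟩
      · exact hacc c h1
    · refine ih (n / 10) _ ?_ c hc
      intro c' hc'
      rcases List.mem_cons.mp hc' with h1 | h1
      · exact ⟨n % 10, Nat.mod_lt _ (by norm_num), h1⟩
      · exact hacc c' h1

lemma pyIntChar_digitChar (d : Nat) (hd : d < 10) : pyIntChar (Nat.digitChar d) = (d : Int) := by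
  interval_cases d <;> decide

lemma digit_range (num : Int) (h : 0 ≤ num) :
    ∀ c ∈ (PySem.Int.toStr num).toList, 0 ≤ pyIntChar c ∧ pyIntChar c ≤ 9 := by
  intro c hc
  rw [PySem.Int.toList_toStr] at hc
  have he : PySem.Int.toChars num = Nat.toDigits 10 num.toNat := by
    simp [PySem.Int.toChars, not_lt.mpr h]
  rw [he] at hc
  obtain ⟨d, hd, rfl⟩ := toDigitsCore_digits _ _ _ (by simp) c hc
  rw [pyIntChar_digitChar d hd]
  omega

-- descending scan 9..0
lemma range_desc : PySem.List.pyRange 9 (-1) (-1) = [9, 8, 7, 6, 5, 4, 3, 2, 1, 0] := by decide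

lemma mem_range_desc (h : Int) (h0 : 0 ≤ h) (h9 : h ≤ 9) :
    h ∈ ([9, 8, 7, 6, 5, 4, 3, 2, 1, 0] : List Int) := by
  interval_cases h <;> decide

lemma range_desc_bounds : ∀ d ∈ ([9, 8, 7, 6, 5, 4, 3, 2, 1, 0] : List Int), 0 ≤ d ∧ d ≤ 9 := by
  decide

lemma range_desc_pairwise : List.Pairwise (fun a b => b < a) ([9, 8, 7, 6, 5, 4, 3, 2, 1, 0] : List Int) := by
  decide

-- pickB returns the first hit of a strictly descending candidate list
lemma pickB_spec (p h : Int) (cnt : List Int) :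
    ∀ ds : List Int, List.Pairwise (fun a b => b < a) ds → h ∈ ds →
    ((PySem.Int.band h 1 == p) && decide (0 < PySem.List.pyGetD cnt h 0)) = true →
    (∀ d ∈ ds, h < d → ((PySem.Int.band d 1 == p) && decide (0 < PySem.List.pyGetD cnt d 0)) = false) →
    pickB p cnt ds = some h := by
  intro ds
  induction ds with
  | nil => intro _ hmem; cases hmem
  | cons d rest ih =>
    intro hpw hmem hpred hfalse
    by_cases hd : d = h
    · subst hd; simp [pickB, hpred]
    · have hr : h ∈ rest := by
        rcases List.mem_cons.mp hmem with h1 | h1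
        · exact absurd h1.symm hd
        · exact h1
      have hlt : h < d := (List.pairwise_cons.mp hpw).1 h hr
      have hfd : ((PySem.Int.band d 1 == p) && decide (0 < PySem.List.pyGetD cnt d 0)) = false :=
        hfalse d (List.mem_cons_self ..) hlt
      rw [pickB, hfd]
      exact ih (List.pairwise_cons.mp hpw).2 hr hpred
        (fun d' hd' hlt' => hfalse d' (List.mem_cons_of_mem _ hd') hlt')

-- reading the table after a single write
lemma pyGetD_set (cnt : List Int) (hlen : cnt.length = 10) (v d : Int)
    (hv0 : 0 ≤ v) (hv9 : v ≤ 9) (hd0 : 0 ≤ d) (hd9 : d ≤ 9) (x : Int) :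
    PySem.List.pyGetD (cnt.set v.toNat x) d 0 = if d = v then x else PySem.List.pyGetD cnt d 0 := by
  rw [PySem.List.pyGetD_of_nonneg _ _ hd0, PySem.List.pyGetD_of_nonneg _ _ hd0]
  rw [List.getD_eq_getElem?_getD, List.getD_eq_getElem?_getD, List.getElem?_set]
  by_cases h : d = v
  · subst h
    simp only [hlen]
    have : d.toNat < 10 := by omega
    simp [this]
  · have : v.toNat ≠ d.toNat := by omega
    simp [this, h]

-- the loop invariant tying A's (odds, even) state to B's cnt table
def LoopInv (cs : List Char) (odds evens cnt : List Int) : Prop :=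
  List.Pairwise (fun a b => b ≤ a) odds ∧
  (∀ x ∈ odds, 0 ≤ x ∧ x ≤ 9 ∧ PySem.Int.band x 1 = 1) ∧
  List.Pairwise (fun a b => b ≤ a) evens ∧
  (∀ x ∈ evens, 0 ≤ x ∧ x ≤ 9 ∧ PySem.Int.band x 1 = 0) ∧
  cnt.length = 10 ∧
  (∀ d : Int, 0 ≤ d → d ≤ 9 →
    PySem.List.pyGetD cnt d 0 =
      if PySem.Int.band d 1 = 1 then (odds.count d : Int) else (evens.count d : Int)) ∧
  cs.countP (fun c => oddp (pyIntChar c)) = odds.length ∧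
  cs.countP (fun c => !oddp (pyIntChar c)) = evens.length

lemma count_cons_pos (h : Int) (t : List Int) : (0 : Int) < ((h :: t).count h : Int) := by
  have h1 : 0 < (h :: t).count h := by rw [List.count_cons_self]; omega
  exact_mod_cast h1

lemma loop_sim : ∀ (cs : List Char) (odds evens cnt : List Int), LoopInv cs odds evens cnt →
    ∀ (ansA : String) (outB : List String),
    ansA.toList = (outB.map String.toList).flatten →
    (cs.foldl aStep (odds, evens, ansA)).2.2.toList
      = ((cs.foldl bStep (cnt, outB)).2.map String.toList).flatten := by
  intro cs
  induction cs with
  | nil => intro odds evens cnt _ ansA outB hrel; simpa using hrel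
  | cons c cs ih =>
    intro odds evens cnt hinv ansA outB hrel
    obtain ⟨hop, hom, hep, hem, hlen, hcnt, hco, hce⟩ := hinv
    rcases band1_cases (pyIntChar c) with hb | hb
    · -- even digit: A pops `even`, B picks the largest even digit with positive count
      have hod : oddp (pyIntChar c) = false := by simp [oddp, hb]
      have hcp : (c :: cs).countP (fun c => !oddp (pyIntChar c))
          = cs.countP (fun c => !oddp (pyIntChar c)) + 1 := by
        rw [List.countP_cons]; simp [hod]
      obtain ⟨h, t, rfl⟩ : ∃ h t, evens = h :: t := by
        cases evens with
        | nil => rw [hcp] at hce; simp at hce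
        | cons h t => exact ⟨h, t, rfl⟩
      obtain ⟨hh0, hh9, hhband⟩ := hem h (List.mem_cons_self ..)
      -- A's step
      have hA : aStep (odds, h :: t, ansA) c = (odds, t, ansA ++ PySem.Int.toStr h) := by
        simp [aStep, hb]
      -- B's pick finds the same digit h
      have hpick : pickB (PySem.Int.band (pyIntChar c) 1) cnt (PySem.List.pyRange 9 (-1) (-1))
          = some h := by
        rw [hb, range_desc]
        refine pickB_spec _ _ _ _ range_desc_pairwise (mem_range_desc h hh0 hh9) ?_ ?_
        · have hv : PySem.List.pyGetD cnt h 0 = ((h :: t).count h : Int) := by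
            rw [hcnt h hh0 hh9]; simp [hhband]
          simp only [hhband, hv, beq_self_eq_true, Bool.true_and, decide_eq_true_eq]
          exact count_cons_pos h t
        · intro d hd hlt
          obtain ⟨hd0, hd9⟩ := range_desc_bounds d hd
          rcases band1_cases d with hdb | hdb
          · have hnotin : d ∉ (h :: t) := by
              intro hmem
              have : d ≤ h := by
                rcases List.mem_cons.mp hmem with h1 | h1
                · omega
                · exact (List.pairwise_cons.mp hep).1 d h1
              omega
            have : PySem.List.pyGetD cnt d 0 = 0 := by
              rw [hcnt d hd0 hd9]
              simp [hdb, List.count_eq_zero.mpr hnotin]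
            simp [this]
          · simp [hdb]
      have hB : bStep (cnt, outB) c
          = (cnt.set h.toNat (PySem.List.pyGetD cnt h 0 - 1), outB ++ [PySem.Int.toStr h]) := by
        unfold bStep
        dsimp only
        rw [hpick]
      rw [List.foldl_cons, List.foldl_cons, hA, hB]
      -- re-establish the invariant
      apply ih
      · refine ⟨hop, hom, (List.pairwise_cons.mp hep).2,
          (fun x hx => hem x (List.mem_cons_of_mem _ hx)), by simp [hlen], ?_, ?_, ?_⟩
        · intro d hd0 hd9
          rw [pyGetD_set cnt hlen h d hh0 hh9 hd0 hd9]
          by_cases hdh : d = h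
          · rw [if_pos hdh]; subst hdh
            rw [hcnt d hd0 hd9]
            simp [hhband, List.count_cons_self]
          · rw [if_neg hdh, hcnt d hd0 hd9]
            have hhd : (h == d) = false := by simp; omega
            rcases band1_cases d with hdb | hdb <;>
              simp [hdb, List.count_cons, hhd]
        · rw [List.countP_cons] at hco; simpa [hod] using hco
        · rw [hcp] at hce; simp at hce; omega
      · simp [String.toList_append, PySem.Int.toList_toStr, hrel]
    · -- odd digit: A pops `odds`, B picks the largest odd digit with positive count
      have hod : oddp (pyIntChar c) = true := (oddp_true_iff _).mpr hb
      have hcp : (c :: cs).countP (fun c => oddp (pyIntChar c))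
          = cs.countP (fun c => oddp (pyIntChar c)) + 1 := by
        rw [List.countP_cons]; simp [hod]
      obtain ⟨h, t, rfl⟩ : ∃ h t, odds = h :: t := by
        cases odds with
        | nil => rw [hcp] at hco; simp at hco
        | cons h t => exact ⟨h, t, rfl⟩
      obtain ⟨hh0, hh9, hhband⟩ := hom h (List.mem_cons_self ..)
      have hA : aStep (h :: t, evens, ansA) c = (t, evens, ansA ++ PySem.Int.toStr h) := by
        simp [aStep, hb]
      have hpick : pickB (PySem.Int.band (pyIntChar c) 1) cnt (PySem.List.pyRange 9 (-1) (-1))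
          = some h := by
        rw [hb, range_desc]
        refine pickB_spec _ _ _ _ range_desc_pairwise (mem_range_desc h hh0 hh9) ?_ ?_
        · have hv : PySem.List.pyGetD cnt h 0 = ((h :: t).count h : Int) := by
            rw [hcnt h hh0 hh9]; simp [hhband]
          simp only [hhband, hv, beq_self_eq_true, Bool.true_and, decide_eq_true_eq]
          exact count_cons_pos h t
        · intro d hd hlt
          obtain ⟨hd0, hd9⟩ := range_desc_bounds d hd
          rcases band1_cases d with hdb | hdb
          · simp [hdb]
          · have hnotin : d ∉ (h :: t) := by
              intro hmem
              have : d ≤ h := by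
                rcases List.mem_cons.mp hmem with h1 | h1
                · omega
                · exact (List.pairwise_cons.mp hop).1 d h1
              omega
            have : PySem.List.pyGetD cnt d 0 = 0 := by
              rw [hcnt d hd0 hd9]
              simp [hdb, List.count_eq_zero.mpr hnotin]
            simp [this]
      have hB : bStep (cnt, outB) c
          = (cnt.set h.toNat (PySem.List.pyGetD cnt h 0 - 1), outB ++ [PySem.Int.toStr h]) := by
        unfold bStep
        dsimp only
        rw [hpick]
      rw [List.foldl_cons, List.foldl_cons, hA, hB]
      apply ih
      · refine ⟨(List.pairwise_cons.mp hop).2,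
          (fun x hx => hom x (List.mem_cons_of_mem _ hx)), hep, hem, by simp [hlen], ?_, ?_, ?_⟩
        · intro d hd0 hd9
          rw [pyGetD_set cnt hlen h d hh0 hh9 hd0 hd9]
          by_cases hdh : d = h
          · rw [if_pos hdh]; subst hdh
            rw [hcnt d hd0 hd9]
            simp [hhband, List.count_cons_self]
          · rw [if_neg hdh, hcnt d hd0 hd9]
            have hhd : (h == d) = false := by simp; omega
            rcases band1_cases d with hdb | hdb <;>
              simp [hdb, List.count_cons, hhd]
        · rw [hcp] at hco; simp at hco; omega
        · rw [List.countP_cons] at hce; simpa [hod] using hce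
      · simp [String.toList_append, PySem.Int.toList_toStr, hrel]

-- join with the empty separator is concatenation
lemma join_nil_flatten (l : List (List Char)) : PySem.Chars.join [] l = l.flatten := by
  induction l with
  | nil => exact PySem.Chars.join_nil []
  | cons a t ih =>
    cases t with
    | nil => simp [PySem.Chars.join_singleton]
    | cons b t2 => rw [PySem.Chars.join_cons_cons]; simp_all

-- the initial frequency table counts the digit values
lemma bCount_fold (cs : List Char) : ∀ cnt : List Int, cnt.length = 10 →
    (∀ c ∈ cs, 0 ≤ pyIntChar c ∧ pyIntChar c ≤ 9) →
    (cs.foldl bCount cnt).length = 10 ∧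
    ∀ d : Int, 0 ≤ d → d ≤ 9 →
      PySem.List.pyGetD (cs.foldl bCount cnt) d 0
        = PySem.List.pyGetD cnt d 0 + ((cs.map pyIntChar).count d : Int) := by
  induction cs with
  | nil =>
    intro cnt hlen _
    refine ⟨by simpa using hlen, ?_⟩
    intro d _ _; simp
  | cons c cs ih =>
    intro cnt hlen hdig
    have hc := hdig c (List.mem_cons_self ..)
    have hlen' : (bCount cnt c).length = 10 := by simp [bCount, hlen]
    obtain ⟨ihlen, ihget⟩ := ih (bCount cnt c) hlen'
      (fun c' hc' => hdig c' (List.mem_cons_of_mem _ hc'))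
    refine ⟨by simpa using ihlen, ?_⟩
    intro d hd0 hd9
    rw [List.foldl_cons, ihget d hd0 hd9]
    have hset : PySem.List.pyGetD (bCount cnt c) d 0
        = if d = pyIntChar c then PySem.List.pyGetD cnt (pyIntChar c) 0 + 1
          else PySem.List.pyGetD cnt d 0 := by
      unfold bCount
      rw [pyGetD_set cnt hlen _ _ hc.1 hc.2 hd0 hd9]
    rw [hset, List.map_cons, List.count_cons]
    by_cases h : d = pyIntChar c
    · subst h; simp; ring
    · have hne : (pyIntChar c == d) = false := by simp; omega
      simp [hne, h]

lemma replicate_zero_get (d : Int) (hd0 : 0 ≤ d) :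
    PySem.List.pyGetD (List.replicate 10 (0 : Int)) d 0 = 0 := by
  rw [PySem.List.pyGetD_of_nonneg _ _ hd0, List.getD_eq_getElem?_getD,
    List.getElem?_replicate]
  split <;> rfl

lemma init_inv (num : Int) (hnum : 0 ≤ num) :
    LoopInv (PySem.Int.toStr num).toList
      (PySem.List.sorted (((PySem.Int.toStr num).toList.map pyIntChar).filter
        (fun i => !(PySem.Int.band i 1 == 0))) (fun x => x) true)
      (PySem.List.sorted (((PySem.Int.toStr num).toList.map pyIntChar).filter
        (fun i => PySem.Int.band i 1 == 0)) (fun x => x) true)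
      ((PySem.Int.toStr num).toList.foldl bCount (List.replicate 10 (0 : Int))) := by
  have hdig := digit_range num hnum
  obtain ⟨hlen10, hget⟩ := bCount_fold (PySem.Int.toStr num).toList
    (List.replicate 10 (0 : Int)) (by simp) hdig
  refine ⟨PySem.List.sorted_pairwise_rev _ _, ?_, PySem.List.sorted_pairwise_rev _ _, ?_,
    hlen10, ?_, ?_, ?_⟩
  · intro x hx
    rw [PySem.List.mem_sorted] at hx
    obtain ⟨hx1, hx2⟩ := List.mem_filter.mp hx
    obtain ⟨c, hc, rfl⟩ := List.mem_map.mp hx1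
    obtain ⟨h0, h9⟩ := hdig c hc
    refine ⟨h0, h9, ?_⟩
    rcases band1_cases (pyIntChar c) with hbb | hbb
    · simp [hbb] at hx2
    · exact hbb
  · intro x hx
    rw [PySem.List.mem_sorted] at hx
    obtain ⟨hx1, hx2⟩ := List.mem_filter.mp hx
    obtain ⟨c, hc, rfl⟩ := List.mem_map.mp hx1
    obtain ⟨h0, h9⟩ := hdig c hc
    exact ⟨h0, h9, by simpa using hx2⟩
  · intro d hd0 hd9
    rw [hget d hd0 hd9, replicate_zero_get d hd0]
    rw [(PySem.List.sorted_perm _ _ _).count_eq, (PySem.List.sorted_perm _ _ _).count_eq]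
    rcases band1_cases d with hbb | hbb
    · rw [if_neg (by simp [hbb])]
      rw [List.count_filter (p := fun i => PySem.Int.band i 1 == 0) (a := d) (by simp [hbb])]
      omega
    · rw [if_pos hbb]
      rw [List.count_filter (p := fun i => !(PySem.Int.band i 1 == 0)) (a := d) (by simp [hbb])]
      omega
  · rw [List.countP_eq_length_filter, PySem.List.length_sorted, List.filter_map,
      List.length_map]
    rfl
  · rw [List.countP_eq_length_filter, PySem.List.length_sorted, List.filter_map,
      List.length_map]
    congr 1
    apply List.filter_congr
    intro c _
    simp [oddp]

-- ===== VERDICT (by name: the statement is the Claim_ definition above) =====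
theorem largestInteger_spec : Claim_equal_largestInteger := by
  intro num _ hpre
  unfold Spec_largestInteger largestInteger largestInteger_alt
  dsimp only
  have hsim := loop_sim (PySem.Int.toStr num).toList _ _ _ (init_inv num hpre) "" [] (by simp)
  have hlist : ((PySem.Int.toStr num).toList.foldl aStep
        (PySem.List.sorted (((PySem.Int.toStr num).toList.map pyIntChar).filter
          (fun i => !(PySem.Int.band i 1 == 0))) (fun x => x) true,
         PySem.List.sorted (((PySem.Int.toStr num).toList.map pyIntChar).filter
          (fun i => PySem.Int.band i 1 == 0)) (fun x => x) true, "")).2.2.toList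
      = (PySem.Str.join "" ((PySem.Int.toStr num).toList.foldl bStep
          ((PySem.Int.toStr num).toList.foldl bCount (List.replicate 10 (0 : Int)),
           ([] : List String))).2).toList := by
    rw [hsim]
    simp [PySem.Str.join, String.toList_ofList, join_nil_flatten, String.toList_empty]
  refine congrArg (fun o => Option.getD o 0) ?_
  unfold PySem.Int.ofStr?
  exact congrArg _ hlist
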